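-- pv_equiv track=rewrite | github.com/akshay-greenlang/Code-V1_GreenLang | _archive/04_shadow_development_tree/GreenLang Development/02-Applications/GL Agents/GL-011_FuelCraft/integration/opcua_connector.py | create_fuel_system_tag_list
-- ===== SOURCE A (Python) =====
-- from typing import Any, Callable, Dict, List, Optional, Set, Tuple
--
-- def create_fuel_system_tag_list(tank_ids: List[str], namespace: int = 2) -> Dict[str, List[str]]:
--     """Create standard fuel system tag list."""
--     tags = {
--         "levels": [],
--         "temperatures": [],
--         "flow_rates": [],
--         "densities": [],
--     }
--
--     for tank_id in tank_ids:
--         tags["levels"].append(f"ns={namespace};s=FuelSystem.Tank.{tank_id}.Level")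
--         tags["temperatures"].append(f"ns={namespace};s=FuelSystem.Tank.{tank_id}.Temperature")
--         tags["flow_rates"].append(f"ns={namespace};s=FuelSystem.Tank.{tank_id}.FlowRate")
--         tags["densities"].append(f"ns={namespace};s=FuelSystem.Tank.{tank_id}.Density")
--
--     return tags
-- ===== SOURCE B (Python) =====
-- from typing import Dict, List
--
-- def create_fuel_system_tag_list(tank_ids: List[str], namespace: int = 2) -> Dict[str, List[str]]:
--     """Create standard fuel system tag list.
--
--     Builds one flat tank-major stream of tags (Level, Temperature, FlowRate,
--     Density interleaved per tank) and recovers each category by stride-4 slicing.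
--     """
--     flat = [f"ns={namespace};s=FuelSystem.Tank.{tank_id}.{suffix}"
--             for tank_id in tank_ids
--             for suffix in ("Level", "Temperature", "FlowRate", "Density")]
--     return {
--         "levels": flat[0::4],
--         "temperatures": flat[1::4],
--         "flow_rates": flat[2::4],
--         "densities": flat[3::4],
--     }
-- ===== Notes on version B (the rewrite author's own statement) =====
-- stated objective: alternative
-- what changed: Replaces A's single loop that mutates four dict entries with a two-stage algorithm: first one flat tank-major interleaved stream of all tags, then each category recovered by stride-4 slicing (flat[k::4]).
import Mathlib
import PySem

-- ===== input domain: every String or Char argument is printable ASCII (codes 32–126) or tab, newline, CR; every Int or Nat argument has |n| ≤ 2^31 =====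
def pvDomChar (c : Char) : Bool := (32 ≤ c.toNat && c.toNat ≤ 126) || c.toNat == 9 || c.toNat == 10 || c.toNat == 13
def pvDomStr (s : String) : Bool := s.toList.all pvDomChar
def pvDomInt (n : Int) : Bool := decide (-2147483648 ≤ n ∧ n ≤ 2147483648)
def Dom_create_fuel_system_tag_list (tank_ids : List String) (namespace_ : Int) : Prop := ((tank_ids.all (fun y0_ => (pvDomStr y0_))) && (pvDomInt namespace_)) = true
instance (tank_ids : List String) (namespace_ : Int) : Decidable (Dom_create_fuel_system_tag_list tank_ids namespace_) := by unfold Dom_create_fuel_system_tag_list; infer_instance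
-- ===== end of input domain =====

-- B replaces A's dict-mutating loop with a two-stage algorithm: one flat tank-major
-- interleaved stream of tags, then each category recovered by stride-4 slicing (alternative).


-- ===== PORT A =====
-- f"ns={namespace};s=FuelSystem.Tank.{tank_id}.{suffix}"
def pvTag (namespace_ : Int) (tank_id : String) (suffix : String) : String :=
  "ns=" ++ PySem.Int.toStr namespace_ ++ ";s=FuelSystem.Tank." ++ tank_id ++ "." ++ suffix

def create_fuel_system_tag_list (tank_ids : List String) (namespace_ : Int) : List (String × List String) :=
  let tags : PySem.Dict String (List String) :=
    PySem.Dict.ofList [("levels", []), ("temperatures", []), ("flow_rates", []), ("densities", [])]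
  let tags := tank_ids.foldl (fun tags tank_id =>
    let tags := PySem.Dict.modify tags "levels" [] (fun l => l ++ [pvTag namespace_ tank_id "Level"])
    let tags := PySem.Dict.modify tags "temperatures" [] (fun l => l ++ [pvTag namespace_ tank_id "Temperature"])
    let tags := PySem.Dict.modify tags "flow_rates" [] (fun l => l ++ [pvTag namespace_ tank_id "FlowRate"])
    let tags := PySem.Dict.modify tags "densities" [] (fun l => l ++ [pvTag namespace_ tank_id "Density"])
    tags) tags
  tags.items

-- ===== PORT B =====
-- flat = [f"…{tank_id}.{suffix}" for tank_id in tank_ids for suffix in ("Level","Temperature","FlowRate","Density")]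
def pvFlat (tank_ids : List String) (namespace_ : Int) : List String :=
  tank_ids.flatMap (fun tank_id =>
    ["Level", "Temperature", "FlowRate", "Density"].map (fun suffix => pvTag namespace_ tank_id suffix))

-- then flat[k::4] for k = 0,1,2,3; step 4 ≠ 0, so slice? is always `some` (getD's default is dead).
def create_fuel_system_tag_list_alt (tank_ids : List String) (namespace_ : Int) : List (String × List String) :=
  let flat := pvFlat tank_ids namespace_
  [("levels", (PySem.List.slice? flat (some 0) none 4).getD []),
   ("temperatures", (PySem.List.slice? flat (some 1) none 4).getD []),
   ("flow_rates", (PySem.List.slice? flat (some 2) none 4).getD []),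
   ("densities", (PySem.List.slice? flat (some 3) none 4).getD [])]

-- ===== PRECONDITION & SPEC =====
def Spec_create_fuel_system_tag_list (tank_ids : List String) (namespace_ : Int) (out : List (String × List String)) : Prop := out = create_fuel_system_tag_list_alt tank_ids namespace_
instance (tank_ids : List String) (namespace_ : Int) (out : List (String × List String)) : Decidable (Spec_create_fuel_system_tag_list tank_ids namespace_ out) := by unfold Spec_create_fuel_system_tag_list; infer_instance

-- ===== CLAIM =====
def Claim_equal_create_fuel_system_tag_list : Prop := ∀ (tank_ids : List String) (namespace_ : Int), Dom_create_fuel_system_tag_list tank_ids namespace_ → Spec_create_fuel_system_tag_list tank_ids namespace_ (create_fuel_system_tag_list tank_ids namespace_)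

-- ===== LEMMAS AND PROOFS =====
-- One iteration of A's loop on the four-entry dict appends one tag to each entry.
theorem pv_step (namespace_ : Int) (x : String) (a b c d : List String) :
    PySem.Dict.modify (PySem.Dict.modify (PySem.Dict.modify (PySem.Dict.modify
      (PySem.Dict.mk [("levels", a), ("temperatures", b), ("flow_rates", c), ("densities", d)])
      "levels" [] (fun l => l ++ [pvTag namespace_ x "Level"]))
      "temperatures" [] (fun l => l ++ [pvTag namespace_ x "Temperature"]))
      "flow_rates" [] (fun l => l ++ [pvTag namespace_ x "FlowRate"]))
      "densities" [] (fun l => l ++ [pvTag namespace_ x "Density"]) =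
    PySem.Dict.mk [("levels", a ++ [pvTag namespace_ x "Level"]), ("temperatures", b ++ [pvTag namespace_ x "Temperature"]), ("flow_rates", c ++ [pvTag namespace_ x "FlowRate"]), ("densities", d ++ [pvTag namespace_ x "Density"])] := by
  simp [PySem.Dict.modify, PySem.Dict.insert, PySem.Dict.getD, PySem.Dict.get?, PySem.Dict.contains]

-- Loop invariant: A's whole loop appends, entry-wise, the mapped tags for tank_ids.
theorem pv_loop_inv (tank_ids : List String) (namespace_ : Int)
    (ls ts fs ds : List String) :
    tank_ids.foldl (fun tags tank_id =>
      let tags := PySem.Dict.modify tags "levels" [] (fun l => l ++ [pvTag namespace_ tank_id "Level"])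
      let tags := PySem.Dict.modify tags "temperatures" [] (fun l => l ++ [pvTag namespace_ tank_id "Temperature"])
      let tags := PySem.Dict.modify tags "flow_rates" [] (fun l => l ++ [pvTag namespace_ tank_id "FlowRate"])
      let tags := PySem.Dict.modify tags "densities" [] (fun l => l ++ [pvTag namespace_ tank_id "Density"])
      tags)
      (PySem.Dict.mk [("levels", ls), ("temperatures", ts), ("flow_rates", fs), ("densities", ds)]) =
    PySem.Dict.mk
      [("levels", ls ++ tank_ids.map (fun t => pvTag namespace_ t "Level")),
       ("temperatures", ts ++ tank_ids.map (fun t => pvTag namespace_ t "Temperature")),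
       ("flow_rates", fs ++ tank_ids.map (fun t => pvTag namespace_ t "FlowRate")),
       ("densities", ds ++ tank_ids.map (fun t => pvTag namespace_ t "Density"))] := by
  induction tank_ids generalizing ls ts fs ds with
  | nil => simp
  | cons x xs ih =>
    simp only [List.foldl_cons, List.map_cons]
    rw [pv_step, ih]
    simp

-- Every 4th element of a list, starting at its head (proof-side characterisation of x[k::4]).
def pvEvery4 {α : Type} : List α → List α
  | [] => []
  | [x] => [x]
  | [x, _] => [x]
  | [x, _, _] => [x]
  | x :: _ :: _ :: _ :: rest => x :: pvEvery4 rest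

theorem pvEvery4_cons_drop {α : Type} (y : α) (l : List α) :
    pvEvery4 (y :: l) = y :: pvEvery4 (l.drop 3) := by
  match l with
  | [] => rfl
  | [_] => rfl
  | [_, _] => rfl
  | _ :: _ :: _ :: _ => rfl

theorem pv_filterMap_every4 {α : Type} (ys : List α) :
    (List.range ((ys.length + 3) / 4)).filterMap (fun m => ys[4 * m]?) = pvEvery4 ys := by
  fun_induction pvEvery4 ys with
  | case1 => simp
  | case2 x => simp [List.range_succ]
  | case3 x y => simp [List.range_succ]
  | case4 x y z => simp [List.range_succ]
  | case5 x a b c rest ih =>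
    have hc : ((x :: a :: b :: c :: rest).length + 3) / 4 = (rest.length + 3) / 4 + 1 := by
      simp only [List.length_cons]; omega
    rw [hc, List.range_succ_eq_map, List.filterMap_cons, List.filterMap_map]
    simp only [Nat.mul_zero, List.getElem?_cons_zero]
    rw [← ih]
    congr 1

-- x[k::4] is every 4th element of x from index k on (step 4 ≠ 0: always `some`).
theorem pv_slice4 {α : Type} (xs : List α) (k : ℕ) :
    PySem.List.slice? xs (some (k : Int)) none 4 = some (pvEvery4 (xs.drop k)) := by
  rw [← pv_filterMap_every4]
  simp only [PySem.List.slice?, PySem.List.sliceIndices]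
  norm_num
  simp only [if_neg (show ¬((k:ℤ) < 0) from by omega)]
  by_cases h : k < xs.length
  · have hmin : min (k:ℤ) (xs.length:ℤ) = k := min_eq_left (by exact_mod_cast h.le)
    simp only [hmin]
    rw [if_pos (by exact_mod_cast h)]
    have hcnt : (((xs.length:ℤ) - k + 4 - 1)/4).toNat = (xs.length - k + 3)/4 := by omega
    rw [hcnt]
    apply List.filterMap_congr
    intro m _
    congr 1
  · have hmin : min (k:ℤ) (xs.length:ℤ) = xs.length := min_eq_right (by exact_mod_cast (Nat.le_of_not_lt h))
    simp only [hmin]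
    rw [if_neg (by omega)]
    have h0 : (xs.length - k + 3)/4 = 0 := by omega
    rw [h0]
    simp

-- The flat interleaved stream of a cons.
theorem pv_flat_cons (namespace_ : Int) (x : String) (xs : List String) :
    pvFlat (x :: xs) namespace_ =
    pvTag namespace_ x "Level" :: pvTag namespace_ x "Temperature" :: pvTag namespace_ x "FlowRate" :: pvTag namespace_ x "Density" ::
      pvFlat xs namespace_ := by
  simp [pvFlat]

-- Deinterleaving the flat stream at offsets 0..3 yields the four categories.
theorem pv_flat0 (tank_ids : List String) (namespace_ : Int) :
    pvEvery4 (pvFlat tank_ids namespace_) = tank_ids.map (fun t => pvTag namespace_ t "Level") := by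
  induction tank_ids with
  | nil => rfl
  | cons x xs ih => rw [pv_flat_cons, pvEvery4_cons_drop]; simp [ih]

theorem pv_flat1 (tank_ids : List String) (namespace_ : Int) :
    pvEvery4 ((pvFlat tank_ids namespace_).drop 1) = tank_ids.map (fun t => pvTag namespace_ t "Temperature") := by
  induction tank_ids with
  | nil => rfl
  | cons x xs ih =>
    rw [pv_flat_cons]
    simp only [List.drop_succ_cons, List.drop_zero]
    rw [pvEvery4_cons_drop]
    simp only [List.drop_succ_cons, List.map_cons]
    simp [- List.drop_one, ih]

theorem pv_flat2 (tank_ids : List String) (namespace_ : Int) :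
    pvEvery4 ((pvFlat tank_ids namespace_).drop 2) = tank_ids.map (fun t => pvTag namespace_ t "FlowRate") := by
  induction tank_ids with
  | nil => rfl
  | cons x xs ih =>
    rw [pv_flat_cons]
    simp only [List.drop_succ_cons, List.drop_zero]
    rw [pvEvery4_cons_drop]
    simp only [List.drop_succ_cons, List.map_cons]
    simp [ih]

theorem pv_flat3 (tank_ids : List String) (namespace_ : Int) :
    pvEvery4 ((pvFlat tank_ids namespace_).drop 3) = tank_ids.map (fun t => pvTag namespace_ t "Density") := by
  induction tank_ids with
  | nil => rfl
  | cons x xs ih =>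
    rw [pv_flat_cons]
    simp only [List.drop_succ_cons, List.drop_zero]
    rw [pvEvery4_cons_drop]
    simp only [List.map_cons]
    simp [ih]

-- ===== VERDICT =====
theorem create_fuel_system_tag_list_spec : Claim_equal_create_fuel_system_tag_list := by
  intro tank_ids namespace_ _
  unfold Spec_create_fuel_system_tag_list create_fuel_system_tag_list create_fuel_system_tag_list_alt
  dsimp only
  rw [show PySem.Dict.ofList [("levels", ([] : List String)), ("temperatures", []), ("flow_rates", []), ("densities", [])] =
      PySem.Dict.mk [("levels", []), ("temperatures", []), ("flow_rates", []), ("densities", [])] from by decide]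
  rw [pv_loop_inv]
  rw [show (0 : Int) = ((0 : ℕ) : Int) from rfl, show (1 : Int) = ((1 : ℕ) : Int) from rfl,
      show (2 : Int) = ((2 : ℕ) : Int) from rfl, show (3 : Int) = ((3 : ℕ) : Int) from rfl]
  rw [pv_slice4, pv_slice4, pv_slice4, pv_slice4]
  simp only [List.drop_zero, Option.getD_some]
  rw [pv_flat0, pv_flat1, pv_flat2, pv_flat3]
  simp
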